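-- pv_equiv track=rewrite | github.com/csixteen/HackerRank | Algorithms/electronics_shop.py | electronics_shop
-- ===== SOURCE A (Python) =====
-- def electronics_shop(s, n, m, keyboards, usbs):
--     keyboards = sorted(keyboards, reverse=True)
--     usbs = sorted(usbs)
--     j, max_value = 0, -1
--     for i in range(n):
--         while j < m:
--             if keyboards[i] + usbs[j] > s:
--                 break
--             elif keyboards[i] + usbs[j] > max_value:
--                 max_value = keyboards[i] + usbs[j]
--             j += 1
--
--     return max_value
-- ===== SOURCE B (Python) =====
-- def electronics_shop(s, n, m, keyboards, usbs):
--     keyboards = sorted(keyboards, reverse=True)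
--     usbs = sorted(usbs)
--     max_value = -1
--     for i in range(n):
--         for j in range(m):
--             total = keyboards[i] + usbs[j]
--             if total <= s and total > max_value:
--                 max_value = total
--     return max_value
-- ===== Notes on version B (the rewrite author's own statement) =====
-- stated objective: simpler
-- what changed: Replaced A's stateful two-pointer sweep (a pointer j that never resets, advancing along the ascending usbs while keyboards descend) with a plain brute-force nested loop that checks every keyboard/usb pair independently.
-- outside the precondition, e.g. on electronics_shop(100, 2, 1, [1], [1]): A returns 2, B raises IndexError; on electronics_shop(100, 1, 2, [5], [3]): A raises IndexError, B raises IndexError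
import Mathlib
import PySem

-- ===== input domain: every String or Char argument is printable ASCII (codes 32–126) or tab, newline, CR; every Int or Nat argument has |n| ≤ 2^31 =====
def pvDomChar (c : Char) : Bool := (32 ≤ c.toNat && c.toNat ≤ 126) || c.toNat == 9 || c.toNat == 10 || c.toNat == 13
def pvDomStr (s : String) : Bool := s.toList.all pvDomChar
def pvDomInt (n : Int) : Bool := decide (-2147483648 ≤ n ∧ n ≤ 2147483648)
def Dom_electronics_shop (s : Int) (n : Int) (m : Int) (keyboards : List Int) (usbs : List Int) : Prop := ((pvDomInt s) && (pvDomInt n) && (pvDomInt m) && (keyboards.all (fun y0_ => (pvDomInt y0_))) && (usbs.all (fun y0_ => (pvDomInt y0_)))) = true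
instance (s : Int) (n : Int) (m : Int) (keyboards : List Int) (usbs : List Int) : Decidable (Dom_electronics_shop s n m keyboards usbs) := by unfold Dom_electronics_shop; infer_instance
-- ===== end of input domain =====

-- B replaces A's non-resetting two-pointer sweep by a plain brute-force scan of every
-- keyboard/usb pair (simpler to read; same sorted lists, same -1 default).

-- ===== PORT A =====
-- the inner `while j < m: …` loop of A; fuel = (m - j).toNat at every call
def shopWhile (s m : Int) (U : List Int) (k : Int) : Nat → Int → Int → Int × Int
  | 0, j, mv => (j, mv)
  | fuel+1, j, mv =>
    if j < m then
      if k + PySem.List.pyGetD U j 0 > s then (j, mv)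
      else
        shopWhile s m U k fuel (j+1)
          (if k + PySem.List.pyGetD U j 0 > mv then k + PySem.List.pyGetD U j 0 else mv)
    else (j, mv)

def electronics_shop (s : Int) (n : Int) (m : Int) (keyboards : List Int) (usbs : List Int) : Int :=
  let K := PySem.List.sorted keyboards (fun x => x) true
  let U := PySem.List.sorted usbs (fun x => x) false
  let r := (PySem.List.pyRange 0 n 1).foldl
    (fun (st : Int × Int) i =>
      shopWhile s m U (PySem.List.pyGetD K i 0) ((m - st.1).toNat) st.1 st.2) (0, -1)
  r.2

-- ===== PORT B =====
def electronics_shop_alt (s : Int) (n : Int) (m : Int) (keyboards : List Int) (usbs : List Int) : Int :=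
  let K := PySem.List.sorted keyboards (fun x => x) true
  let U := PySem.List.sorted usbs (fun x => x) false
  (PySem.List.pyRange 0 n 1).foldl (fun mv i =>
    (PySem.List.pyRange 0 m 1).foldl (fun mv2 j =>
      let t := PySem.List.pyGetD K i 0 + PySem.List.pyGetD U j 0
      if t ≤ s ∧ t > mv2 then t else mv2) mv) (-1)

-- ===== PRECONDITION & SPEC =====
-- Pre_ excludes mismatched counts (n beyond len(keyboards) with m > 0, or m beyond len(usbs)
-- with n > 0): there B's full nested scan raises IndexError, while A's non-resetting pointer j
-- may dodge the out-of-range access and return, or raise itself.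
def Pre_electronics_shop (s : Int) (n : Int) (m : Int) (keyboards : List Int) (usbs : List Int) : Prop :=
  (n ≤ (keyboards.length : Int) ∨ m ≤ 0) ∧ (m ≤ (usbs.length : Int) ∨ n ≤ 0)
instance (s : Int) (n : Int) (m : Int) (keyboards : List Int) (usbs : List Int) : Decidable (Pre_electronics_shop s n m keyboards usbs) := by unfold Pre_electronics_shop; infer_instance

def pvWitness_electronics_shop : Int × Int × Int × List Int × List Int := (10, 2, 2, [3, 1], [1, 2])

def Spec_electronics_shop (s : Int) (n : Int) (m : Int) (keyboards : List Int) (usbs : List Int) (out : Int) : Prop := out = electronics_shop_alt s n m keyboards usbs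
instance (s : Int) (n : Int) (m : Int) (keyboards : List Int) (usbs : List Int) (out : Int) : Decidable (Spec_electronics_shop s n m keyboards usbs out) := by unfold Spec_electronics_shop; infer_instance

-- ===== CLAIM (what is proved, stated in full; the proofs are below) =====
def Claim_equal_electronics_shop : Prop := ∀ (s : Int) (n : Int) (m : Int) (keyboards : List Int) (usbs : List Int), Dom_electronics_shop s n m keyboards usbs → Pre_electronics_shop s n m keyboards usbs → Spec_electronics_shop s n m keyboards usbs (electronics_shop s n m keyboards usbs)

-- ===== LEMMAS AND PROOFS =====

-- a fold whose step fixes the initial accumulator returns it unchanged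
theorem pvFoldlFix {α β : Type} (f : α → β → α) (a : α) (l : List β)
    (h : ∀ b ∈ l, f a b = a) : l.foldl f a = a := by
  induction l with
  | nil => rfl
  | cons x xs ih =>
      simp only [List.foldl_cons, h x (by simp)]
      exact ih (fun b hb => h b (by simp [hb]))

-- full description of one run of A's inner while-loop, called with exact fuel (m - j).toNat
theorem shopWhile_spec (s m : Int) (U : List Int) (k : Int)
    (fuel : Nat) : ∀ (j mv : Int), j ≤ m → fuel = (m - j).toNat →
    j ≤ (shopWhile s m U k fuel j mv).1 ∧
    (shopWhile s m U k fuel j mv).1 ≤ m ∧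
    mv ≤ (shopWhile s m U k fuel j mv).2 ∧
    (∀ b : Int, j ≤ b → b < (shopWhile s m U k fuel j mv).1 →
      k + PySem.List.pyGetD U b 0 ≤ s ∧ k + PySem.List.pyGetD U b 0 ≤ (shopWhile s m U k fuel j mv).2) ∧
    ((shopWhile s m U k fuel j mv).1 = m ∨ k + PySem.List.pyGetD U (shopWhile s m U k fuel j mv).1 0 > s) ∧
    (shopWhile s m U k fuel j mv).2 =
      (PySem.List.pyRange j (shopWhile s m U k fuel j mv).1 1).foldl
        (fun a b => max a (k + PySem.List.pyGetD U b 0)) mv := by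
  induction fuel with
  | zero =>
      intro j mv hj hfuel
      have hjm : j = m := by omega
      simp [shopWhile, hjm, PySem.List.pyRange_one_eq_nil (le_refl m)]
      intro b hb hb'; omega
  | succ fuel ih =>
      intro j mv hj hfuel
      have hjm : j < m := by omega
      by_cases hbig : k + PySem.List.pyGetD U j 0 > s
      · simp only [shopWhile, if_pos hjm, if_pos hbig]
        refine ⟨le_refl j, le_of_lt hjm, le_refl mv, ?_, Or.inr hbig, ?_⟩
        · intro b hb hb'; omega
        · simp [PySem.List.pyRange_one_eq_nil (le_refl j)]
      · have := ih (j+1) (if k + PySem.List.pyGetD U j 0 > mv then k + PySem.List.pyGetD U j 0 else mv)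
          (by omega) (by omega)
        obtain ⟨h1, h2, h3, h4, h5, h6⟩ := this
        simp only [shopWhile, if_pos hjm, if_neg hbig]
        set r := shopWhile s m U k fuel (j+1)
          (if k + PySem.List.pyGetD U j 0 > mv then k + PySem.List.pyGetD U j 0 else mv) with hr
        have hmv2 : mv ≤ (if k + PySem.List.pyGetD U j 0 > mv then k + PySem.List.pyGetD U j 0 else mv) := by
          split_ifs <;> omega
        have htle : k + PySem.List.pyGetD U j 0 ≤ (if k + PySem.List.pyGetD U j 0 > mv then k + PySem.List.pyGetD U j 0 else mv) := by
          split_ifs <;> omega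
        refine ⟨by omega, h2, by omega, ?_, h5, ?_⟩
        · intro b hb hb'
          by_cases hbj : b = j
          · subst hbj; exact ⟨by omega, by omega⟩
          · exact h4 b (by omega) hb'
        · rw [PySem.List.pyRange_one_cons (by omega : j < r.1)]
          rw [List.foldl_cons]
          have : max mv (k + PySem.List.pyGetD U j 0) = (if k + PySem.List.pyGetD U j 0 > mv then k + PySem.List.pyGetD U j 0 else mv) := by
            split_ifs <;> omega
          rw [this]
          exact h6

-- B's inner full scan over range(m) collapses to the segment [j, j') that A actually visited
theorem innerB_eq (s m : Int) (U : List Int) (k mv j j' : Int)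
    (hUm : ∀ a b : Int, 0 ≤ a → a ≤ b → b < m → PySem.List.pyGetD U a 0 ≤ PySem.List.pyGetD U b 0)
    (h0j : 0 ≤ j) (hjj' : j ≤ j') (hj'm : j' ≤ m)
    (hskip : ∀ b : Int, 0 ≤ b → b < j → k + PySem.List.pyGetD U b 0 ≤ mv)
    (hseg : ∀ b : Int, j ≤ b → b < j' → k + PySem.List.pyGetD U b 0 ≤ s)
    (hstop : j' = m ∨ k + PySem.List.pyGetD U j' 0 > s) :
    (PySem.List.pyRange 0 m 1).foldl
      (fun a b => if k + PySem.List.pyGetD U b 0 ≤ s ∧ k + PySem.List.pyGetD U b 0 > a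
                  then k + PySem.List.pyGetD U b 0 else a) mv
    = (PySem.List.pyRange j j' 1).foldl (fun a b => max a (k + PySem.List.pyGetD U b 0)) mv := by
  rw [PySem.List.pyRange_one_append 0 j m h0j (by omega), List.foldl_append]
  rw [PySem.List.pyRange_one_append j j' m hjj' hj'm, List.foldl_append]
  rw [pvFoldlFix _ mv _ (by
    intro b hb
    rw [PySem.List.mem_pyRange_one] at hb
    have := hskip b hb.1 hb.2
    simp only [if_neg (by omega : ¬ (k + PySem.List.pyGetD U b 0 ≤ s ∧ k + PySem.List.pyGetD U b 0 > mv))])]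
  have h2 : (PySem.List.pyRange j j' 1).foldl
      (fun a b => if k + PySem.List.pyGetD U b 0 ≤ s ∧ k + PySem.List.pyGetD U b 0 > a
                  then k + PySem.List.pyGetD U b 0 else a) mv
      = (PySem.List.pyRange j j' 1).foldl (fun a b => max a (k + PySem.List.pyGetD U b 0)) mv := by
    apply PySem.List.foldl_congr_mem
    intro acc b hb
    rw [PySem.List.mem_pyRange_one] at hb
    have := hseg b hb.1 hb.2
    split_ifs <;> omega
  rw [h2]
  apply pvFoldlFix
  intro b hb
  rw [PySem.List.mem_pyRange_one] at hb
  rcases hstop with h | h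
  · omega
  · have : PySem.List.pyGetD U j' 0 ≤ PySem.List.pyGetD U b 0 := hUm j' b (by omega) hb.1 hb.2
    rw [if_neg (by omega : ¬ (k + PySem.List.pyGetD U b 0 ≤ s ∧ k + PySem.List.pyGetD U b 0 > _))]

-- A's running state (pointer, best) versus B's running best, after the first N keyboards
theorem outer_inv (s m : Int) (K U : List Int)
    (hKm : ∀ a b : Int, 0 ≤ a → a ≤ b → b < (K.length : Int) →
      PySem.List.pyGetD K b 0 ≤ PySem.List.pyGetD K a 0)
    (hUm : ∀ a b : Int, 0 ≤ a → a ≤ b → b < m → PySem.List.pyGetD U a 0 ≤ PySem.List.pyGetD U b 0)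
    (hm0 : 0 ≤ m) :
    ∀ N : Nat, (N : Int) ≤ (K.length : Int) →
    0 ≤ ((PySem.List.pyRange 0 (N : Int) 1).foldl
        (fun (st : Int × Int) i =>
          shopWhile s m U (PySem.List.pyGetD K i 0) ((m - st.1).toNat) st.1 st.2) (0, -1)).1 ∧
    ((PySem.List.pyRange 0 (N : Int) 1).foldl
        (fun (st : Int × Int) i =>
          shopWhile s m U (PySem.List.pyGetD K i 0) ((m - st.1).toNat) st.1 st.2) (0, -1)).1 ≤ m ∧
    (∀ b : Int, 0 ≤ b →
      b < ((PySem.List.pyRange 0 (N : Int) 1).foldl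
        (fun (st : Int × Int) i =>
          shopWhile s m U (PySem.List.pyGetD K i 0) ((m - st.1).toNat) st.1 st.2) (0, -1)).1 →
      ∃ a : Int, 0 ≤ a ∧ a < (N : Int) ∧
        PySem.List.pyGetD K a 0 + PySem.List.pyGetD U b 0 ≤
          ((PySem.List.pyRange 0 (N : Int) 1).foldl
            (fun (st : Int × Int) i =>
              shopWhile s m U (PySem.List.pyGetD K i 0) ((m - st.1).toNat) st.1 st.2) (0, -1)).2) ∧
    ((PySem.List.pyRange 0 (N : Int) 1).foldl
        (fun (st : Int × Int) i =>
          shopWhile s m U (PySem.List.pyGetD K i 0) ((m - st.1).toNat) st.1 st.2) (0, -1)).2 =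
      (PySem.List.pyRange 0 (N : Int) 1).foldl (fun mv i =>
        (PySem.List.pyRange 0 m 1).foldl (fun mv2 j =>
          let t := PySem.List.pyGetD K i 0 + PySem.List.pyGetD U j 0
          if t ≤ s ∧ t > mv2 then t else mv2) mv) (-1) := by
  intro N
  induction N with
  | zero =>
      intro _
      simp only [Nat.cast_zero, PySem.List.pyRange_one_eq_nil (le_refl (0:Int)), List.foldl_nil]
      exact ⟨le_refl 0, hm0, fun b hb hb' => absurd hb' (by omega), trivial⟩
  | succ N ih =>
      intro hlen
      have hcast : ((N + 1 : Nat) : Int) = (N : Int) + 1 := by push_cast; ring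
      have hNK : (N : Int) < (K.length : Int) := by push_cast at hlen ⊢; omega
      obtain ⟨ih1, ih2, ih3, ih4⟩ := ih (by omega)
      rw [hcast, PySem.List.pyRange_one_succ_right (Int.natCast_nonneg N), List.foldl_append,
        List.foldl_append]
      set st := ((PySem.List.pyRange 0 (N : Int) 1).foldl
        (fun (st : Int × Int) i =>
          shopWhile s m U (PySem.List.pyGetD K i 0) ((m - st.1).toNat) st.1 st.2) (0, -1)) with hst
      simp only [List.foldl_cons, List.foldl_nil]
      obtain ⟨w1, w2, w3, w4, w5, w6⟩ :=
        shopWhile_spec s m U (PySem.List.pyGetD K (N:Int) 0) ((m - st.1).toNat) st.1 st.2 ih2 rfl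
      have hskip : ∀ b : Int, 0 ≤ b → b < st.1 →
          PySem.List.pyGetD K (N:Int) 0 + PySem.List.pyGetD U b 0 ≤ st.2 := by
        intro b hb0 hbj
        obtain ⟨a, ha1, ha2, ha3⟩ := ih3 b hb0 hbj
        have := hKm a (N:Int) ha1 (by omega) hNK
        omega
      refine ⟨by omega, w2, ?_, ?_⟩
      · intro b hb hb'
        by_cases hcase : b < st.1
        · obtain ⟨a, ha1, ha2, ha3⟩ := ih3 b hb hcase
          exact ⟨a, ha1, by omega, by omega⟩
        · exact ⟨(N:Int), Int.natCast_nonneg N, by omega, (w4 b (by omega) hb').2⟩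
      · rw [← ih4]
        exact w6.trans (innerB_eq s m U (PySem.List.pyGetD K (N:Int) 0) st.2 st.1
          (shopWhile s m U (PySem.List.pyGetD K (N:Int) 0) ((m - st.1).toNat) st.1 st.2).1
          hUm ih1 w1 w2 hskip (fun b hb hb' => (w4 b hb hb').1) w5).symm

-- a sorted-ascending list is pointwise monotone under pyGetD
theorem pvMonoLe (U : List Int) (hp : U.Pairwise (· ≤ ·)) :
    ∀ a b : Int, 0 ≤ a → a ≤ b → b < (U.length : Int) →
      PySem.List.pyGetD U a 0 ≤ PySem.List.pyGetD U b 0 := by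
  intro a b ha hab hb
  rw [PySem.List.pyGetD_eq_getElem U 0 ha (by omega), PySem.List.pyGetD_eq_getElem U 0 (by omega) hb]
  rcases eq_or_lt_of_le hab with h | h
  · subst h; exact le_refl _
  · exact (List.pairwise_iff_getElem.mp hp) a.toNat b.toNat (by omega) (by omega) (by omega)

-- a sorted-descending list is pointwise antitone under pyGetD
theorem pvMonoGe (K : List Int) (hp : K.Pairwise (fun a b => b ≤ a)) :
    ∀ a b : Int, 0 ≤ a → a ≤ b → b < (K.length : Int) →
      PySem.List.pyGetD K b 0 ≤ PySem.List.pyGetD K a 0 := by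
  intro a b ha hab hb
  rw [PySem.List.pyGetD_eq_getElem K 0 ha (by omega), PySem.List.pyGetD_eq_getElem K 0 (by omega) hb]
  rcases eq_or_lt_of_le hab with h | h
  · subst h; exact le_refl _
  · exact (List.pairwise_iff_getElem.mp hp) a.toNat b.toNat (by omega) (by omega) (by omega)

theorem pvMainEq (s n m : Int) (keyboards usbs : List Int)
    (hpre : Pre_electronics_shop s n m keyboards usbs) :
    electronics_shop s n m keyboards usbs = electronics_shop_alt s n m keyboards usbs := by
  obtain ⟨hpre1, hpre2⟩ := hpre
  unfold electronics_shop electronics_shop_alt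
  dsimp only
  by_cases hn : n ≤ 0
  · rw [PySem.List.pyRange_one_eq_nil hn]
    rfl
  · by_cases hm : m ≤ 0
    · have hfixA : ∀ i ∈ PySem.List.pyRange 0 n 1,
          (fun (st : Int × Int) i =>
            shopWhile s m (PySem.List.sorted usbs (fun x => x) false)
              (PySem.List.pyGetD (PySem.List.sorted keyboards (fun x => x) true) i 0)
              ((m - st.1).toNat) st.1 st.2) ((0:Int), (-1:Int)) i = ((0:Int), (-1:Int)) := by
        intro i _
        show shopWhile s m (PySem.List.sorted usbs (fun x => x) false)
          (PySem.List.pyGetD (PySem.List.sorted keyboards (fun x => x) true) i 0)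
          ((m - (0:Int)).toNat) 0 (-1) = ((0:Int), (-1:Int))
        rw [show (m - (0:Int)).toNat = 0 from by omega]
        rfl
      have hfixB : ∀ i ∈ PySem.List.pyRange 0 n 1,
          (fun (mv : Int) i =>
            (PySem.List.pyRange 0 m 1).foldl (fun mv2 j =>
              let t := PySem.List.pyGetD (PySem.List.sorted keyboards (fun x => x) true) i 0 +
                PySem.List.pyGetD (PySem.List.sorted usbs (fun x => x) false) j 0
              if t ≤ s ∧ t > mv2 then t else mv2) mv) (-1 : Int) i = (-1 : Int) := by
        intro i _
        show (PySem.List.pyRange 0 m 1).foldl _ (-1 : Int) = (-1 : Int)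
        rw [PySem.List.pyRange_one_eq_nil hm, List.foldl_nil]
      rw [pvFoldlFix _ _ _ hfixA, pvFoldlFix _ _ _ hfixB]
    · have hmu : m ≤ (usbs.length : Int) := hpre2.resolve_right hn
      have hnk : n ≤ (keyboards.length : Int) := hpre1.resolve_right hm
      have hUlen : ((PySem.List.sorted usbs (fun x => x) false).length : Int) = (usbs.length : Int) := by
        rw [PySem.List.length_sorted]
      have hKlen : ((PySem.List.sorted keyboards (fun x => x) true).length : Int) = (keyboards.length : Int) := by
        rw [PySem.List.length_sorted]
      have hUm : ∀ a b : Int, 0 ≤ a → a ≤ b → b < m →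
          PySem.List.pyGetD (PySem.List.sorted usbs (fun x => x) false) a 0 ≤
          PySem.List.pyGetD (PySem.List.sorted usbs (fun x => x) false) b 0 :=
        fun a b ha hab hb =>
          pvMonoLe _ (PySem.List.sorted_pairwise usbs (fun x => x)) a b ha hab (by omega)
      have hcast : ((n.toNat : Nat) : Int) = n := Int.toNat_of_nonneg (by omega)
      rw [show PySem.List.pyRange 0 n 1 = PySem.List.pyRange 0 ((n.toNat : Nat) : Int) 1 from by rw [hcast]]
      obtain ⟨_, _, _, heq⟩ := outer_inv s m
        (PySem.List.sorted keyboards (fun x => x) true)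
        (PySem.List.sorted usbs (fun x => x) false)
        (pvMonoGe _ (PySem.List.sorted_pairwise_rev keyboards (fun x => x)))
        hUm (by omega) n.toNat (by omega)
      exact heq

-- ===== VERDICT (by name: the statement is the Claim_ definition above) =====
theorem electronics_shop_spec : Claim_equal_electronics_shop := by
  intro s n m keyboards usbs _ hpre
  exact pvMainEq s n m keyboards usbs hpre
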